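-- pv_equiv track=rewrite | github.com/eellak/AI4Deliberation | ΦΕΚ/nomoi/check_badness/cleaner.py | analyze_text_metrics
-- ===== SOURCE A (Python) =====
-- def analyze_text_metrics(text):
--     """Calculate text metrics for the given string."""
--     # Logic to calculate text metrics (implement based on your requirements)
--     total_chars = len(text)
--     non_whitespace = sum(1 for c in text if not c.isspace())
--     lines = text.count('\n') + 1
--
--     # Return a dictionary of metrics
--     return {
--         'total_chars': total_chars,
--         'non_whitespace_chars': non_whitespace,
--         'lines': lines,
--         # You can add more metrics here
--     }
-- ===== SOURCE B (Python) =====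
-- def analyze_text_metrics(text):
--     """Calculate text metrics for the given string."""
--     # Derive all metrics from string splitting instead of per-character scans:
--     # whitespace-splitting gives the maximal non-whitespace runs (their total
--     # length is the non-whitespace count) and newline-splitting gives the lines.
--     words = text.split()
--     return {
--         'total_chars': len(text),
--         'non_whitespace_chars': sum(len(w) for w in words),
--         'lines': len(text.split('\n')),
--     }
-- ===== Notes on version B (the rewrite author's own statement) =====
-- stated objective: faster
-- what changed: B derives the metrics from string splitting instead of per-character counting: whitespace-splitting yields the maximal non-whitespace runs whose total length is the non-whitespace count, and the number of pieces of a newline split gives the line count, replacing A's Python-level generator-sum over characters with C-level split operations.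
import Mathlib
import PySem

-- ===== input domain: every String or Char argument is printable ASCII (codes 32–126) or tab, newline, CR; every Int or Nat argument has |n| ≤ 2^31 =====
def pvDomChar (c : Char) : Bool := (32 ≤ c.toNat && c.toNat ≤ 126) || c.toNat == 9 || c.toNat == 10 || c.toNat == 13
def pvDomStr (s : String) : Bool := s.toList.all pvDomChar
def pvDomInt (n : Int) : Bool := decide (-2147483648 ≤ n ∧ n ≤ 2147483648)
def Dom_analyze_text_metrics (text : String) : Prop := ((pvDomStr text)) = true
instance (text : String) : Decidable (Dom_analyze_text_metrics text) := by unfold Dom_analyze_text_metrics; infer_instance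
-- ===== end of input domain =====

-- B derives the metrics from string splits (whitespace split for the non-whitespace count,
-- newline split for the line count) instead of A's per-character generator-sum; measured faster (constant factor).

-- ===== PORT A =====
def analyze_text_metrics (text : String) : List (String × Int) :=
  let total_chars : Int := PySem.Str.len text
  -- sum(1 for c in text if not c.isspace())
  let non_whitespace : Int :=
    ((text.toList.filter (fun c => !PySem.Chars.isspace c)).map (fun _ => (1 : Int))).sum
  -- text.count('\n') + 1
  let lines : Int := (PySem.Str.count text "\n" : Int) + 1
  [("total_chars", total_chars), ("non_whitespace_chars", non_whitespace), ("lines", lines)]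

-- ===== PORT B =====
def analyze_text_metrics_alt (text : String) : List (String × Int) :=
  -- words = text.split()
  let words := PySem.Str.split₀ text
  [("total_chars", PySem.Str.len text),
   -- sum(len(w) for w in words)
   ("non_whitespace_chars", (words.map (fun w => PySem.Str.len w)).sum),
   -- len(text.split('\n')): the separator is the non-empty literal '\n', so
   -- str.split(sep) is exactly PySem.Chars.splitOn (the sep ≠ "" form)
   ("lines", ((PySem.Chars.splitOn text.toList ['\n']).length : Int))]

-- ===== PRECONDITION & SPEC =====
def Spec_analyze_text_metrics (text : String) (out : List (String × Int)) : Prop := out = analyze_text_metrics_alt text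
instance (text : String) (out : List (String × Int)) : Decidable (Spec_analyze_text_metrics text out) := by unfold Spec_analyze_text_metrics; infer_instance

-- ===== CLAIM (what is proved, stated in full; the proofs are below) =====
def Claim_equal_analyze_text_metrics : Prop := ∀ (text : String), Dom_analyze_text_metrics text → Spec_analyze_text_metrics text (analyze_text_metrics text)

-- ===== LEMMAS AND PROOFS =====

-- the single-character substring count of Python's str.count is the character count
theorem pv_count_go_single (c : Char) :
    ∀ (fuel : Nat) (s : List Char) (acc : Nat), s.length ≤ fuel →
      PySem.Chars.count.go [c] fuel s acc = acc + s.count c := by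
  intro fuel
  induction fuel with
  | zero =>
      intro s acc h
      have : s = [] := List.eq_nil_of_length_eq_zero (Nat.le_zero.mp h)
      subst this; simp [PySem.Chars.count.go]
  | succ n ih =>
      intro s acc h
      cases s with
      | nil => simp [PySem.Chars.count.go]
      | cons x t =>
          have ht : t.length ≤ n := by simpa using h
          by_cases hx : x = c
          · subst hx
            have hp : [x].isPrefixOf (x :: t) = true := by simp [List.isPrefixOf]
            simp only [PySem.Chars.count.go, hp, if_pos]
            rw [show (x :: t).drop [x].length = t by simp]
            rw [ih t (acc + 1) ht]
            simp; omega
          · have hp : [c].isPrefixOf (x :: t) = false := by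
              simp [List.isPrefixOf]; exact fun h' => absurd h'.symm hx
            simp only [PySem.Chars.count.go, hp]
            rw [ih t acc ht]
            simp [hx]

theorem pv_chars_count_single (c : Char) (s : List Char) :
    PySem.Chars.count s [c] = s.count c := by
  simpa [PySem.Chars.count] using pv_count_go_single c s.length s 0 (le_refl _)

-- A's generator sum is the non-whitespace character count
theorem pv_sum_filter (l : List Char) (p : Char → Bool) :
    ((l.filter p).map (fun _ => (1 : Int))).sum = (l.countP p : Int) := by
  rw [List.countP_eq_length_filter]
  induction l.filter p with
  | nil => simp
  | cons x t ih => simp; omega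

-- total word length carried through the whitespace-split loop
theorem pv_split0_go_sum :
    ∀ (l cur : List Char) (acc : List (List Char)),
      ((PySem.Chars.split₀.go l cur acc).map List.length).sum
        = (acc.map List.length).sum + cur.length + l.countP (fun c => !PySem.Chars.isspace c) := by
  intro l
  induction l with
  | nil =>
      intro cur acc
      by_cases h : cur.isEmpty <;> simp [PySem.Chars.split₀.go, h] <;> simp_all [List.isEmpty_iff]
  | cons c rest ih =>
      intro cur acc
      by_cases hs : PySem.Chars.isspace c
      · by_cases hc : cur.isEmpty
        · have : cur = [] := by simpa [List.isEmpty_iff] using hc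
          subst this
          simp [PySem.Chars.split₀.go, hs, hc, ih]
        · simp [PySem.Chars.split₀.go, hs, hc, ih]
          omega
      · simp [PySem.Chars.split₀.go, hs, ih]
        omega

-- the number of pieces of a single-character split is the separator count plus one
theorem pv_splitOn_go_len (c : Char) :
    ∀ (fuel : Nat) (l cur : List Char) (acc : List (List Char)), l.length < fuel →
      (PySem.Chars.splitOn.go [c] fuel l cur acc).length = acc.length + 1 + l.count c := by
  intro fuel
  induction fuel with
  | zero => intro l cur acc h; omega
  | succ n ih =>
      intro l cur acc h
      cases l with
      | nil => simp [PySem.Chars.splitOn.go]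
      | cons x t =>
          have ht : t.length < n := by simpa using h
          by_cases hx : x = c
          · subst hx
            have hp : [x].isPrefixOf (x :: t) = true := by simp [List.isPrefixOf]
            simp only [PySem.Chars.splitOn.go, hp, if_pos]
            rw [show (x :: t).drop [x].length = t by simp]
            rw [ih t [] (cur.reverse :: acc) ht]
            simp; omega
          · have hp : [c].isPrefixOf (x :: t) = false := by
              simp [List.isPrefixOf]; exact fun h' => absurd h'.symm hx
            simp only [PySem.Chars.splitOn.go, hp, Bool.false_eq_true, if_false]
            rw [ih t (x :: cur) acc ht]
            simp [hx]

-- the Int sum of Python lengths is the cast sum of the underlying character-list lengths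
theorem pv_strlen_sum (ss : List String) :
    (ss.map (fun w => PySem.Str.len w)).sum = (((ss.map String.toList).map List.length).sum : Int) := by
  induction ss with
  | nil => simp
  | cons w t _ih => simp [PySem.Str.len, Function.comp_def]

-- ===== VERDICT (by name: the statement is the Claim_ definition above) =====
theorem analyze_text_metrics_spec : Claim_equal_analyze_text_metrics := by
  intro text _
  unfold Spec_analyze_text_metrics
  simp only [analyze_text_metrics, analyze_text_metrics_alt]
  rw [pv_sum_filter]
  rw [show PySem.Str.count text "\n" = text.toList.count '\n' from by
    simpa [PySem.Str.count_eq] using pv_chars_count_single '\n' text.toList]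
  have hgo := pv_split0_go_sum text.toList [] []
  simp only [List.map_nil, List.sum_nil, List.length_nil, Nat.zero_add, Nat.add_zero] at hgo
  have hw : ((PySem.Str.split₀ text).map (fun w => PySem.Str.len w)).sum
      = (text.toList.countP (fun c => !PySem.Chars.isspace c) : Int) := by
    rw [pv_strlen_sum, PySem.Str.split₀_map_toList]
    simp only [PySem.Chars.split₀]
    exact_mod_cast hgo
  have hl : ((PySem.Chars.splitOn text.toList ['\n']).length : Int)
      = (text.toList.count '\n' : Int) + 1 := by
    have h := pv_splitOn_go_len '\n' (text.toList.length + 1) text.toList [] [] (by omega)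
    simp only [List.length_nil] at h
    simp only [PySem.Chars.splitOn]
    rw [h]
    push_cast
    omega
  rw [hw, hl]
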